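-- pv_equiv track=rewrite | github.com/bilalthiha/indexingMod | helperMod.py | getSortedLargeList
-- ===== SOURCE A (Python) =====
-- def getSortedLargeList(flList):
--     intFiles = []
--     strFiles = []
--     sortedFileList = []
--     for i in flList:
--         idx = i.index('.')
--         if (i[:idx].isnumeric()):
--             intFiles.append(int(i[:idx]))
--         else:
--             strFiles.append(i)
--
--     #sort int files and save them as original string files
--     intFiles.sort()
--     for j in intFiles:
--         sortedFileList.append(str(j) + '.txt')
--
--     #sort str files
--     strFiles.sort()
--     sortedFileList = sortedFileList + strFiles
--
--     return sortedFileList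
-- ===== SOURCE B (Python) =====
-- def getSortedLargeList(flList):
--     # Decorate-sort-undecorate: one unified sort on order-encoding tuples
--     # instead of two buckets sorted separately and concatenated.
--     deco = []
--     for i in flList:
--         prefix = i[:i.index('.')]
--         if prefix.isnumeric():
--             deco.append((0, int(prefix), ''))
--         else:
--             deco.append((1, 0, i))
--     deco.sort()
--     return [str(n) + '.txt' if tag == 0 else s for (tag, n, s) in deco]
-- ===== Notes on version B (the rewrite author's own statement) =====
-- stated objective: idiomatic
-- what changed: B replaces A's two separate buckets, two sorts and a concatenation by a single decorate-sort-undecorate pass: each name becomes an order-encoding tuple (tag, int, str), one sort on the default tuple order puts numerics (by value) before the rest (lexicographic), and one comprehension undecorates.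
import Mathlib
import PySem

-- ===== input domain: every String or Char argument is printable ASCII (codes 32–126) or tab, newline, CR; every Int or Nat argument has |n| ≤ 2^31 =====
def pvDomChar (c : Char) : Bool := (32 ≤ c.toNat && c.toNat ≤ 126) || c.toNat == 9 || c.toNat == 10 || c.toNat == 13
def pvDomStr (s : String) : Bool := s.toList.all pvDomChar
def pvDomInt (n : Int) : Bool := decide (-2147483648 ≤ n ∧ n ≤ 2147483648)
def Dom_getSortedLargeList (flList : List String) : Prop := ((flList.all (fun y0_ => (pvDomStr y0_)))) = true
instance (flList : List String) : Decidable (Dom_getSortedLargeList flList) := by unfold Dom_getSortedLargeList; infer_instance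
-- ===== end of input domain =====

-- B replaces A's two buckets / two sorts / concatenation by one decorate-sort-undecorate
-- pass (objective: idiomatic; same asymptotic cost).

-- ===== PORT A =====
-- Python's isnumeric() is ported as strIsdigit and int() as (ofStr?).getD 0: exact on the
-- printable-ASCII domain, where isnumeric = isdigit and an all-digit prefix always parses.
-- i.index('.') raises ValueError when '.' is absent (excluded by Pre_); there find returns -1.
def getSortedLargeList (flList : List String) : List String :=
  let p := flList.foldl (fun (acc : List Int × List String) i =>
      let idx := PySem.Str.find i "."
      if PySem.Str.strIsdigit (PySem.Str.slice i none (some idx)) then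
        (acc.1 ++ [(PySem.Int.ofStr? (PySem.Str.slice i none (some idx))).getD 0], acc.2)
      else
        (acc.1, acc.2 ++ [i])) (([], []) : List Int × List String)
  let intSorted := PySem.List.sorted p.1 (fun x => x)
  let sortedFileList := intSorted.foldl (fun acc j => acc ++ [PySem.Int.toStr j ++ ".txt"]) []
  sortedFileList ++ PySem.List.sorted p.2 (fun x => x)

-- ===== PORT B =====
-- the decorated tuple for one filename: (0, int(prefix), '') for numerics, (1, 0, i) otherwise
def pyDecorate (i : String) : Int × Int × String :=
  let pre := PySem.Str.slice i none (some (PySem.Str.find i "."))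
  if PySem.Str.strIsdigit pre then (0, (PySem.Int.ofStr? pre).getD 0, "") else (1, 0, i)

def pyUndecorate (t : Int × Int × String) : String :=
  if t.1 == 0 then PySem.Int.toStr t.2.1 ++ ".txt" else t.2.2

-- Python's lexicographic tuple order on (int, int, str)
def pyTupleKey (t : Int × Int × String) : Lex (Int × Lex (Int × String)) :=
  toLex (t.1, toLex (t.2.1, t.2.2))

def getSortedLargeList_alt (flList : List String) : List String :=
  let deco := flList.foldl (fun acc i => acc ++ [pyDecorate i]) []
  (PySem.List.sorted deco pyTupleKey).map pyUndecorate

-- ===== PRECONDITION & SPEC =====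
-- Pre_ excludes exactly the inputs on which A raises: a filename with no '.' makes
-- i.index('.') raise ValueError (B raises at the same site).
def Pre_getSortedLargeList (flList : List String) : Prop :=
  ∀ s ∈ flList, PySem.Str.isIn "." s = true
instance (flList : List String) : Decidable (Pre_getSortedLargeList flList) := by
  unfold Pre_getSortedLargeList; infer_instance

def pvWitness_getSortedLargeList : List String := ["3.txt", "apple.txt", "1.png", "007.txt"]

def Spec_getSortedLargeList (flList : List String) (out : List String) : Prop :=
  out = getSortedLargeList_alt flList
instance (flList : List String) (out : List String) : Decidable (Spec_getSortedLargeList flList out) := by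
  unfold Spec_getSortedLargeList; infer_instance

-- ===== CLAIM =====
def Claim_equal_getSortedLargeList : Prop :=
  ∀ (flList : List String), Dom_getSortedLargeList flList → Pre_getSortedLargeList flList →
    Spec_getSortedLargeList flList (getSortedLargeList flList)

-- ===== LEMMAS AND PROOFS =====

-- the shared per-filename condition and numeric value (proof-only abbreviations)
def pvCond (i : String) : Bool :=
  PySem.Str.strIsdigit (PySem.Str.slice i none (some (PySem.Str.find i ".")))
def pvNum (i : String) : Int :=
  (PySem.Int.ofStr? (PySem.Str.slice i none (some (PySem.Str.find i ".")))).getD 0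

def pvNums (flList : List String) : List Int := (flList.filter pvCond).map pvNum
def pvStrs (flList : List String) : List String := flList.filter (fun i => !pvCond i)

lemma pvA_fold (flList : List String) :
    List.foldl (fun (acc : List Int × List String) i =>
      let idx := PySem.Str.find i "."
      if PySem.Str.strIsdigit (PySem.Str.slice i none (some idx)) then
        (acc.1 ++ [(PySem.Int.ofStr? (PySem.Str.slice i none (some idx))).getD 0], acc.2)
      else
        (acc.1, acc.2 ++ [i])) (([], []) : List Int × List String) flList
      = (pvNums flList, pvStrs flList) := by
  have hstep : (fun (acc : List Int × List String) i =>
      let idx := PySem.Str.find i "."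
      if PySem.Str.strIsdigit (PySem.Str.slice i none (some idx)) then
        (acc.1 ++ [(PySem.Int.ofStr? (PySem.Str.slice i none (some idx))).getD 0], acc.2)
      else
        (acc.1, acc.2 ++ [i]))
      = (fun (acc : List Int × List String) i =>
        ((fun (a : List Int) i => if pvCond i then a ++ [pvNum i] else a) acc.1 i,
         (fun (b : List String) i => if !pvCond i then b ++ [i] else b) acc.2 i)) := by
    funext acc i
    by_cases h : pvCond i
    · simp [pvCond] at h
      simp [pvCond, pvNum, h]
    · simp [pvCond] at h
      simp [pvCond, h]
  rw [hstep, PySem.List.foldl_prod_mk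
        (f := fun (a : List Int) i => if pvCond i then a ++ [pvNum i] else a)
        (g := fun (b : List String) i => if !pvCond i then b ++ [i] else b)]
  rw [PySem.List.foldl_append_if, PySem.List.foldl_append_if_eq_filter]
  simp [pvNums, pvStrs]

lemma pvA_shape (flList : List String) :
    getSortedLargeList flList =
      (PySem.List.sorted (pvNums flList) (fun x => x)).map (fun j => PySem.Int.toStr j ++ ".txt")
        ++ PySem.List.sorted (pvStrs flList) (fun x => x) := by
  simp only [getSortedLargeList, pvA_fold]
  rw [PySem.List.foldl_append_singleton_eq_map, List.nil_append]

lemma pvB_shape (flList : List String) :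
    getSortedLargeList_alt flList =
      (PySem.List.sorted (flList.map pyDecorate) pyTupleKey).map pyUndecorate := by
  unfold getSortedLargeList_alt
  rw [PySem.List.foldl_append_singleton_eq_map]
  simp

lemma pvKey_inj : Function.Injective pyTupleKey := by
  intro a b h
  simp only [pyTupleKey, toLex_inj, Prod.mk.injEq] at h
  exact Prod.ext h.1 (Prod.ext h.2.1 h.2.2)

lemma pvSorted_deco (flList : List String) :
    PySem.List.sorted (flList.map pyDecorate) pyTupleKey =
      (PySem.List.sorted (pvNums flList) (fun x => x)).map (fun n => ((0 : Int), n, ""))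
        ++ (PySem.List.sorted (pvStrs flList) (fun x => x)).map (fun s => ((1 : Int), (0 : Int), s)) := by
  apply PySem.List.eq_of_perm_of_pairwise_le_of_injective pyTupleKey pvKey_inj
  · -- permutation
    refine (PySem.List.sorted_perm _ _ _).trans ?_
    have hmap0 : (flList.filter pvCond).map pyDecorate
        = (pvNums flList).map (fun n => ((0 : Int), n, "")) := by
      rw [List.map_congr_left (f := pyDecorate) (g := fun i => ((0 : Int), pvNum i, ""))
        (by intro i hi
            have hc : pvCond i = true := (List.mem_filter.mp hi).2
            simp [pvCond] at hc
            simp [pyDecorate, pvNum, hc])]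
      simp [pvNums, List.map_map, Function.comp_def]
    have hmap1 : (flList.filter (fun i => !pvCond i)).map pyDecorate
        = (pvStrs flList).map (fun s => ((1 : Int), (0 : Int), s)) := by
      rw [List.map_congr_left (f := pyDecorate) (g := fun i => ((1 : Int), (0 : Int), i))
        (by intro i hi
            have hc : (!pvCond i) = true := (List.mem_filter.mp hi).2
            have hc' : pvCond i = false := by simpa using hc
            simp [pvCond] at hc'
            simp [pyDecorate, hc'])]
      rfl
    refine (((List.filter_append_perm pvCond flList).map pyDecorate).symm).trans ?_
    rw [List.map_append, hmap0, hmap1]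
    exact List.Perm.append
      ((PySem.List.sorted_perm (pvNums flList) (fun x => x) false).map _).symm
      ((PySem.List.sorted_perm (pvStrs flList) (fun x => x) false).map _).symm
  · exact PySem.List.sorted_pairwise _ _
  · -- RHS pairwise
    refine List.pairwise_append.mpr ⟨?_, ?_, ?_⟩
    · refine List.Pairwise.map _ (fun a b hab => ?_) (PySem.List.sorted_pairwise (pvNums flList) (fun x => x))
      simp only [pyTupleKey, Prod.Lex.toLex_le_toLex]
      rcases lt_or_eq_of_le hab with h | h
      · simp [h]
      · simp [h]
    · refine List.Pairwise.map _ (fun a b hab => ?_) (PySem.List.sorted_pairwise (pvStrs flList) (fun x => x))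
      simp only [pyTupleKey, Prod.Lex.toLex_le_toLex]
      simp [hab]
    · intro x hx y hy
      obtain ⟨a, _, rfl⟩ := List.mem_map.mp hx
      obtain ⟨b, _, rfl⟩ := List.mem_map.mp hy
      simp only [pyTupleKey, Prod.Lex.toLex_le_toLex]
      left
      norm_num

-- ===== VERDICT =====
theorem getSortedLargeList_spec : Claim_equal_getSortedLargeList := by
  intro flList _hDom _hPre
  show getSortedLargeList flList = getSortedLargeList_alt flList
  rw [pvA_shape, pvB_shape, pvSorted_deco]
  rw [List.map_append, List.map_map, List.map_map]
  have h1 : (pyUndecorate ∘ fun n : Int => ((0 : Int), n, ""))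
      = (fun j => PySem.Int.toStr j ++ ".txt") := by
    funext n; simp [pyUndecorate]
  have h2 : (pyUndecorate ∘ fun s : String => ((1 : Int), (0 : Int), s)) = id := by
    funext s; simp [pyUndecorate]
  rw [h1, h2, List.map_id]
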